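-- pv_equiv track=rewrite | github.com/joshuareyesverdadero-source/capstone_project | ml_model/color_fashion_predict.py | detect_color_harmony
-- ===== SOURCE A (Python) =====
-- def detect_color_harmony(colors, category_scores):
--     """Detect the type of color harmony in the image"""
--     if not colors:
--         return 'Unknown'
--
--     # Check for neutral dominance
--     if category_scores.get('neutral', 0) > 60:
--         return 'Neutral palette'
--
--     # Check for single color dominance (monochromatic)
--     if len([c for c in colors if c[1] > 15]) <= 2:
--         return 'Monochromatic'
--
--     # Check for warm/cool dominance
--     warm_colors = ['red', 'orange', 'yellow', 'coral', 'salmon', 'pink', 'gold']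
--     cool_colors = ['blue', 'green', 'purple', 'teal', 'turquoise', 'navy', 'royal_blue', 'sky_blue']
--
--     warm_score = sum(score for color, score in colors if color in warm_colors)
--     cool_score = sum(score for color, score in colors if color in cool_colors)
--
--     if warm_score > cool_score * 2:
--         return 'Warm color scheme'
--     elif cool_score > warm_score * 2:
--         return 'Cool color scheme'
--
--     # Check for earth tones
--     earth_colors = ['brown', 'tan', 'beige', 'khaki', 'olive', 'bronze', 'copper']
--     earth_score = sum(score for color, score in colors if color in earth_colors)
--
--     if earth_score > 30:
--         return 'Earth tone palette'
--
--     # Check for pastels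
--     pastel_colors = ['lavender', 'mint', 'cream', 'ivory', 'sky_blue']
--     pastel_score = sum(score for color, score in colors if color in pastel_colors)
--
--     if pastel_score > 25:
--         return 'Pastel color scheme'
--
--     return 'Mixed color palette'
-- ===== SOURCE B (Python) =====
-- _COLOR_CATEGORIES = {
--     'red': ('warm',), 'orange': ('warm',), 'yellow': ('warm',), 'coral': ('warm',),
--     'salmon': ('warm',), 'pink': ('warm',), 'gold': ('warm',),
--     'blue': ('cool',), 'green': ('cool',), 'purple': ('cool',), 'teal': ('cool',),
--     'turquoise': ('cool',), 'navy': ('cool',), 'royal_blue': ('cool',),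
--     'sky_blue': ('cool', 'pastel'),
--     'brown': ('earth',), 'tan': ('earth',), 'beige': ('earth',), 'khaki': ('earth',),
--     'olive': ('earth',), 'bronze': ('earth',), 'copper': ('earth',),
--     'lavender': ('pastel',), 'mint': ('pastel',), 'cream': ('pastel',), 'ivory': ('pastel',),
-- }
--
--
-- def detect_color_harmony(colors, category_scores):
--     """Detect the type of color harmony in the image (single-pass table accumulation)"""
--     if not colors:
--         return 'Unknown'
--
--     if category_scores.get('neutral', 0) > 60:
--         return 'Neutral palette'
--
--     totals = {'warm': 0, 'cool': 0, 'earth': 0, 'pastel': 0}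
--     significant = 0
--     for color, score in colors:
--         if score > 15:
--             significant += 1
--         for cat in _COLOR_CATEGORIES.get(color, ()):
--             totals[cat] += score
--
--     if significant <= 2:
--         return 'Monochromatic'
--
--     if totals['warm'] > totals['cool'] * 2:
--         return 'Warm color scheme'
--     if totals['cool'] > totals['warm'] * 2:
--         return 'Cool color scheme'
--     if totals['earth'] > 30:
--         return 'Earth tone palette'
--     if totals['pastel'] > 25:
--         return 'Pastel color scheme'
--     return 'Mixed color palette'
-- ===== Notes on version B (the rewrite author's own statement) =====
-- stated objective: alternative
-- what changed: Replaces A's four separate membership-filtered sums over the palette by a single pass that looks each color up in a color-to-categories table (sky_blue in both cool and pastel) and accumulates per-category totals and the significant-color count in one loop.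
import Mathlib
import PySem

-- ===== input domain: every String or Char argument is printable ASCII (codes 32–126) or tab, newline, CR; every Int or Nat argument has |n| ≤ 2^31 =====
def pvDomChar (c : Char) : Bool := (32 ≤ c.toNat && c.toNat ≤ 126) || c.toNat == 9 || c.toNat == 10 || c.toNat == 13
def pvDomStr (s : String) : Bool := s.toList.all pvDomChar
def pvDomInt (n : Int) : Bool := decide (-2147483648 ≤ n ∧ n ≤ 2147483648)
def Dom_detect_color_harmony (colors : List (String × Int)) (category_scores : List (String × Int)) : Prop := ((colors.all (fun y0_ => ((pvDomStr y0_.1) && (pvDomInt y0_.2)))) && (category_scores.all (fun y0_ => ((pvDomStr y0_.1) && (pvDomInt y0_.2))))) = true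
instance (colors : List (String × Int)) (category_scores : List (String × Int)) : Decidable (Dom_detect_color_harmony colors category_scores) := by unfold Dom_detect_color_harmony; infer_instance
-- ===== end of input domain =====

-- B replaces A's four separate filtered sums over the palette by one pass that looks each
-- color up in a color→categories table and accumulates per-category totals (objective: alternative).

-- ===== PORT A =====
def pvWarmColors : List String := ["red", "orange", "yellow", "coral", "salmon", "pink", "gold"]
def pvCoolColors : List String := ["blue", "green", "purple", "teal", "turquoise", "navy", "royal_blue", "sky_blue"]
def pvEarthColors : List String := ["brown", "tan", "beige", "khaki", "olive", "bronze", "copper"]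
def pvPastelColors : List String := ["lavender", "mint", "cream", "ivory", "sky_blue"]

def detect_color_harmony (colors : List (String × Int)) (category_scores : List (String × Int)) : String :=
  if colors = [] then "Unknown"
  else if (PySem.Dict.mk category_scores).getD "neutral" 0 > 60 then "Neutral palette"
  else if (colors.filter (fun c => c.2 > 15)).length ≤ 2 then "Monochromatic"
  else
    let warm_score : Int := ((colors.filter (fun p => p.1 ∈ pvWarmColors)).map (·.2)).sum
    let cool_score : Int := ((colors.filter (fun p => p.1 ∈ pvCoolColors)).map (·.2)).sum
    if warm_score > cool_score * 2 then "Warm color scheme"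
    else if cool_score > warm_score * 2 then "Cool color scheme"
    else
      let earth_score : Int := ((colors.filter (fun p => p.1 ∈ pvEarthColors)).map (·.2)).sum
      if earth_score > 30 then "Earth tone palette"
      else
        let pastel_score : Int := ((colors.filter (fun p => p.1 ∈ pvPastelColors)).map (·.2)).sum
        if pastel_score > 25 then "Pastel color scheme"
        else "Mixed color palette"

-- ===== PORT B =====
def pvCatTable : PySem.Dict String (List String) := PySem.Dict.mk
  [("red", ["warm"]), ("orange", ["warm"]), ("yellow", ["warm"]), ("coral", ["warm"]),
   ("salmon", ["warm"]), ("pink", ["warm"]), ("gold", ["warm"]),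
   ("blue", ["cool"]), ("green", ["cool"]), ("purple", ["cool"]), ("teal", ["cool"]),
   ("turquoise", ["cool"]), ("navy", ["cool"]), ("royal_blue", ["cool"]),
   ("sky_blue", ["cool", "pastel"]),
   ("brown", ["earth"]), ("tan", ["earth"]), ("beige", ["earth"]), ("khaki", ["earth"]),
   ("olive", ["earth"]), ("bronze", ["earth"]), ("copper", ["earth"]),
   ("lavender", ["pastel"]), ("mint", ["pastel"]), ("cream", ["pastel"]), ("ivory", ["pastel"])]

def pvStepB (acc : PySem.Dict String Int × Nat) (p : String × Int) : PySem.Dict String Int × Nat :=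
  let sig := if p.2 > 15 then acc.2 + 1 else acc.2
  ((pvCatTable.getD p.1 []).foldl (fun d cat => d.insert cat (d.getD cat 0 + p.2)) acc.1, sig)

def detect_color_harmony_alt (colors : List (String × Int)) (category_scores : List (String × Int)) : String :=
  if colors = [] then "Unknown"
  else if (PySem.Dict.mk category_scores).getD "neutral" 0 > 60 then "Neutral palette"
  else
    let st := colors.foldl pvStepB (PySem.Dict.mk [("warm", 0), ("cool", 0), ("earth", 0), ("pastel", 0)], 0)
    if st.2 ≤ 2 then "Monochromatic"
    else if st.1.getD "warm" 0 > st.1.getD "cool" 0 * 2 then "Warm color scheme"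
    else if st.1.getD "cool" 0 > st.1.getD "warm" 0 * 2 then "Cool color scheme"
    else if st.1.getD "earth" 0 > 30 then "Earth tone palette"
    else if st.1.getD "pastel" 0 > 25 then "Pastel color scheme"
    else "Mixed color palette"

-- ===== PRECONDITION & SPEC =====
def Spec_detect_color_harmony (colors : List (String × Int)) (category_scores : List (String × Int)) (out : String) : Prop := out = detect_color_harmony_alt colors category_scores
instance (colors : List (String × Int)) (category_scores : List (String × Int)) (out : String) : Decidable (Spec_detect_color_harmony colors category_scores out) := by unfold Spec_detect_color_harmony; infer_instance

-- ===== CLAIM (what is proved, stated in full; the proofs are below) =====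
def Claim_equal_detect_color_harmony : Prop := ∀ (colors : List (String × Int)) (category_scores : List (String × Int)), Dom_detect_color_harmony colors category_scores → Spec_detect_color_harmony colors category_scores (detect_color_harmony colors category_scores)

-- ===== LEMMAS AND PROOFS =====

-- getD after the inner accumulation foldl: each insert adds p.2 at its key.
theorem foldl_insert_add_getD (cats : List String) (d : PySem.Dict String Int) (v : Int) (c : String) :
    (cats.foldl (fun d cat => d.insert cat (PySem.Dict.getD d cat 0 + v)) d).getD c 0
      = d.getD c 0 + v * cats.count c := by
  induction cats generalizing d with
  | nil => simp
  | cons hd tl ih =>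
      simp only [List.foldl_cons, ih, PySem.Dict.getD_insert, List.count_cons]
      by_cases h : c = hd
      · subst h; simp; ring
      · have h' : ¬ hd = c := fun hh => h hh.symm
        simp [h, h']

-- the table lookup counts each category exactly when A's membership test succeeds
theorem catTable_count (s : String) :
    ((pvCatTable.getD s []).count "warm" = (if s ∈ pvWarmColors then 1 else 0)) ∧
    ((pvCatTable.getD s []).count "cool" = (if s ∈ pvCoolColors then 1 else 0)) ∧
    ((pvCatTable.getD s []).count "earth" = (if s ∈ pvEarthColors then 1 else 0)) ∧
    ((pvCatTable.getD s []).count "pastel" = (if s ∈ pvPastelColors then 1 else 0)) := by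
  by_cases h : s ∈ pvCatTable.keys
  · simp only [pvCatTable, PySem.Dict.keys_mk, List.map_cons, List.map_nil, List.mem_cons, List.not_mem_nil, or_false] at h
    rcases h with rfl|rfl|rfl|rfl|rfl|rfl|rfl|rfl|rfl|rfl|rfl|rfl|rfl|rfl|rfl|rfl|rfl|rfl|rfl|rfl|rfl|rfl|rfl|rfl|rfl|rfl <;> decide
  · have hc : pvCatTable.contains s = false := by
      rw [PySem.Dict.contains_eq_decide_mem_keys]; simpa using h
    rw [PySem.Dict.getD_of_not_contains _ _ hc]
    have hw : s ∉ pvWarmColors := fun hm => h (by fin_cases hm <;> decide)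
    have hc2 : s ∉ pvCoolColors := fun hm => h (by fin_cases hm <;> decide)
    have he : s ∉ pvEarthColors := fun hm => h (by fin_cases hm <;> decide)
    have hp : s ∉ pvPastelColors := fun hm => h (by fin_cases hm <;> decide)
    simp [hw, hc2, he, hp]

-- loop invariant for B's single pass
theorem loopB_inv (colors : List (String × Int)) (d : PySem.Dict String Int) (n : Nat) :
    (colors.foldl pvStepB (d, n)).1.getD "warm" 0
        = d.getD "warm" 0 + ((colors.filter (fun p => p.1 ∈ pvWarmColors)).map (·.2)).sum ∧
    (colors.foldl pvStepB (d, n)).1.getD "cool" 0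
        = d.getD "cool" 0 + ((colors.filter (fun p => p.1 ∈ pvCoolColors)).map (·.2)).sum ∧
    (colors.foldl pvStepB (d, n)).1.getD "earth" 0
        = d.getD "earth" 0 + ((colors.filter (fun p => p.1 ∈ pvEarthColors)).map (·.2)).sum ∧
    (colors.foldl pvStepB (d, n)).1.getD "pastel" 0
        = d.getD "pastel" 0 + ((colors.filter (fun p => p.1 ∈ pvPastelColors)).map (·.2)).sum ∧
    (colors.foldl pvStepB (d, n)).2 = n + (colors.filter (fun c => c.2 > 15)).length := by
  induction colors generalizing d n with
  | nil => simp
  | cons hd tl ih =>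
      obtain ⟨cw, cc, ce, cp⟩ := catTable_count hd.1
      simp only [List.foldl_cons, pvStepB]
      obtain ⟨iw, ic, ie, ip, is⟩ := ih ((pvCatTable.getD hd.1 []).foldl (fun d cat => d.insert cat (PySem.Dict.getD d cat 0 + hd.2)) d) (if hd.2 > 15 then n + 1 else n)
      refine ⟨?_, ?_, ?_, ?_, ?_⟩
      · rw [iw, foldl_insert_add_getD, cw]
        by_cases h : hd.1 ∈ pvWarmColors  <;> simp [h] <;> ring
      · rw [ic, foldl_insert_add_getD, cc]
        by_cases h : hd.1 ∈ pvCoolColors  <;> simp [h] <;> ring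
      · rw [ie, foldl_insert_add_getD, ce]
        by_cases h : hd.1 ∈ pvEarthColors  <;> simp [h] <;> ring
      · rw [ip, foldl_insert_add_getD, cp]
        by_cases h : hd.1 ∈ pvPastelColors  <;> simp [h] <;> ring
      · rw [is]
        by_cases h : hd.2 > 15  <;> simp [h] <;> omega

-- ===== VERDICT (by name: the statement is the Claim_ definition above) =====
theorem detect_color_harmony_spec : Claim_equal_detect_color_harmony := by
  intro colors category_scores _
  unfold Spec_detect_color_harmony detect_color_harmony detect_color_harmony_alt
  by_cases hnil : colors = []
  · simp [hnil]
  · simp only [if_neg hnil]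
    by_cases hneu : (PySem.Dict.mk category_scores).getD "neutral" 0 > 60
    · simp [hneu]
    · simp only [if_neg hneu]
      obtain ⟨iw, ic, ie, ip, is⟩ := loopB_inv colors (PySem.Dict.mk [("warm", 0), ("cool", 0), ("earth", 0), ("pastel", 0)]) 0
      rw [iw, ic, ie, ip, is]
      simp [PySem.Dict.getD_eq_get?_getD, PySem.Dict.get?_mk_cons]
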